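-- pv_equiv track=rewrite | github.com/bruno-f-cruz/aind-metadata-mapper | src/aind_metadata_mapper/utils/naming_utils.py | get_draw_epochs
-- ===== SOURCE A (Python) =====
-- from typing import Dict, List, Optional, Set, Tuple, Union
--
-- def get_draw_epochs(
--     draw_log: List[int], start_frame: int, stop_frame: int
-- ) -> List[Tuple[int, int]]:
--     """
--     Gets the frame numbers of the active frames within a stimulus window.
--     Stimulus epochs come in the form [0, 0, 1, 1, 0, 0] where the stimulus is
--     active for some amount of time in the window indicated by int 1 at that
--     frame. This function returns the ranges for which the set_log is 1 within
--     the draw_log window.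
--     Parameters
--     ----------
--     draw_log: List[int]
--         A list of ints indicating for what frames stimuli were active
--     start_frame: int
--         The start frame to search within the draw_log for active values
--     stop_frame: int
--         The end frame to search within the draw_log for active values
--
--     Returns
--     -------
--     List[Tuple[int, int]]
--         A list of tuples indicating the start and end frames of every
--         contiguous set of active values within the specified window
--         of the draw log.
--     """
--     draw_epochs = []
--     current_frame = start_frame
--
--     while current_frame <= stop_frame:
--         epoch_length = 0
--         while current_frame < stop_frame and draw_log[current_frame] == 1:
--             epoch_length += 1
--             current_frame += 1
--         else:
--             current_frame += 1
--
--         if epoch_length: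
--             draw_epochs.append(
--                 (
--                     current_frame - epoch_length - 1,
--                     current_frame - 1,
--                 )
--             )
--
--     return draw_epochs
-- ===== SOURCE B (Python) =====
-- def get_draw_epochs(draw_log, start_frame, stop_frame):
--     epochs = []
--     in_run = False
--     run_start = 0
--     for i in range(start_frame, stop_frame):
--         if draw_log[i] == 1:
--             if not in_run:
--                 in_run = True
--                 run_start = i
--         elif in_run:
--             epochs.append((run_start, i))
--             in_run = False
--     if in_run:
--         epochs.append((run_start, stop_frame))
--     return epochs
-- ===== Notes on version B (the rewrite author's own statement) =====
-- stated objective: simpler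
-- what changed: Replaced A's nested while loops with counter arithmetic (epoch_length, current_frame back-computation) by one flat for-loop over range(start_frame, stop_frame) carrying an in_run flag and a run_start index, appending (run_start, i) when a run ends.
import Mathlib
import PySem

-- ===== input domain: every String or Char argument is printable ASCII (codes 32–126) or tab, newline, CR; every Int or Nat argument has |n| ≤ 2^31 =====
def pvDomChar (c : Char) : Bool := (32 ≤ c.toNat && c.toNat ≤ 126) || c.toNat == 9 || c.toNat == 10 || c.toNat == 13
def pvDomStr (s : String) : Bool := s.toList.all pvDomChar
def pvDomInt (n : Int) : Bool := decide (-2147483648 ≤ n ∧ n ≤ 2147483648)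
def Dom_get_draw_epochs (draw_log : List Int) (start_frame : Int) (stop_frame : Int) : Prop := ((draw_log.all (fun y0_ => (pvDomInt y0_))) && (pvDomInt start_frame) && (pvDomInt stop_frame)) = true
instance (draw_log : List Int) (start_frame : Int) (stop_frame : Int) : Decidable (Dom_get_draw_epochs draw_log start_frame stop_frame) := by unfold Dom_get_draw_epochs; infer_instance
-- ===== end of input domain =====

-- B replaces A's nested whiles + counter arithmetic by one flat indexed pass with an in_run flag and run_start index (objective: simpler).

-- ===== PORT A =====
-- inner while: 'while current_frame < stop_frame and draw_log[current_frame] == 1: epoch_length += 1; current_frame += 1'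
-- (draw_log[current_frame] ported as pyGet? with default 0; Pre_ guarantees the index is in Python range;
--  the Nat fuel is only a totality guard — it is always called with enough fuel for the loop to finish on its own)
def pyA_inner (draw_log : List Int) (stop_frame : Int) : Nat → Int → Int → Int × Int
  | 0, c, el => (c, el)
  | Nat.succ f, c, el =>
    if c < stop_frame ∧ (PySem.List.pyGet? draw_log c).getD 0 = 1 then
      pyA_inner draw_log stop_frame f (c + 1) (el + 1)
    else (c, el)

-- outer while: 'while current_frame <= stop_frame: …' (same fuel remark)
def pyA_outer (draw_log : List Int) (stop_frame : Int) : Nat → Int → List (Int × Int) → List (Int × Int)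
  | 0, _, acc => acc
  | Nat.succ f, c, acc =>
    if c ≤ stop_frame then
      let r := pyA_inner draw_log stop_frame (stop_frame - c).toNat c 0
      let c' := r.1 + 1
      let acc' := if r.2 ≠ 0 then acc ++ [(c' - r.2 - 1, c' - 1)] else acc
      pyA_outer draw_log stop_frame f c' acc'
    else acc

def get_draw_epochs (draw_log : List Int) (start_frame : Int) (stop_frame : Int) : List (Int × Int) :=
  pyA_outer draw_log stop_frame (stop_frame + 1 - start_frame).toNat start_frame []

-- ===== PORT B =====
def pyB_step (draw_log : List Int) (st : List (Int × Int) × Bool × Int) (i : Int) : List (Int × Int) × Bool × Int :=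
  if (PySem.List.pyGet? draw_log i).getD 0 = 1 then
    if st.2.1 then st else (st.1, true, i)
  else if st.2.1 then (st.1 ++ [(st.2.2, i)], false, st.2.2) else st

def get_draw_epochs_alt (draw_log : List Int) (start_frame : Int) (stop_frame : Int) : List (Int × Int) :=
  let st := (PySem.List.pyRange start_frame stop_frame 1).foldl (pyB_step draw_log) ([], false, 0)
  if st.2.1 then st.1 ++ [(st.2.2, stop_frame)] else st.1

-- ===== PRECONDITION & SPEC =====
-- Pre_ excludes exactly the inputs on which Python A raises IndexError: some frame in
-- [start_frame, stop_frame) falls outside Python's index range for draw_log.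
def Pre_get_draw_epochs (draw_log : List Int) (start_frame : Int) (stop_frame : Int) : Prop :=
  stop_frame ≤ start_frame ∨ (-(draw_log.length : Int) ≤ start_frame ∧ stop_frame ≤ (draw_log.length : Int))
instance (draw_log : List Int) (start_frame : Int) (stop_frame : Int) : Decidable (Pre_get_draw_epochs draw_log start_frame stop_frame) := by unfold Pre_get_draw_epochs; infer_instance

def pvWitness_get_draw_epochs : List Int × Int × Int := ([0, 1, 1, 0, 1], 0, 5)

def Spec_get_draw_epochs (draw_log : List Int) (start_frame : Int) (stop_frame : Int) (out : List (Int × Int)) : Prop := out = get_draw_epochs_alt draw_log start_frame stop_frame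
instance (draw_log : List Int) (start_frame : Int) (stop_frame : Int) (out : List (Int × Int)) : Decidable (Spec_get_draw_epochs draw_log start_frame stop_frame out) := by unfold Spec_get_draw_epochs; infer_instance

-- ===== CLAIM (what is proved, stated in full; the proofs are below) =====
def Claim_equal_get_draw_epochs : Prop := ∀ (draw_log : List Int) (start_frame : Int) (stop_frame : Int), Dom_get_draw_epochs draw_log start_frame stop_frame → Pre_get_draw_epochs draw_log start_frame stop_frame → Spec_get_draw_epochs draw_log start_frame stop_frame (get_draw_epochs draw_log start_frame stop_frame)

-- ===== LEMMAS AND PROOFS =====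

theorem pyA_inner_fst_ge (draw_log : List Int) (stop_frame : Int) : ∀ f c el, c ≤ (pyA_inner draw_log stop_frame f c el).1 := by
  intro f
  induction f with
  | zero => intro c el; simp [pyA_inner]
  | succ f ih =>
    intro c el
    rw [pyA_inner]
    split
    · have := ih (c + 1) (el + 1); omega
    · simp

theorem pyA_inner_fst_sub (draw_log : List Int) (stop_frame : Int) : ∀ f c el,
    (pyA_inner draw_log stop_frame f c el).1 - (pyA_inner draw_log stop_frame f c el).2 = c - el := by
  intro f
  induction f with
  | zero => intro c el; simp [pyA_inner]
  | succ f ih =>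
    intro c el
    rw [pyA_inner]
    split
    · have := ih (c + 1) (el + 1); omega
    · simp

theorem pyA_inner_fst_indep (draw_log : List Int) (stop_frame : Int) : ∀ f c el el',
    (pyA_inner draw_log stop_frame f c el).1 = (pyA_inner draw_log stop_frame f c el').1 := by
  intro f
  induction f with
  | zero => intro c el el'; simp [pyA_inner]
  | succ f ih =>
    intro c el el'
    rw [pyA_inner, pyA_inner]
    split
    · exact ih (c + 1) (el + 1) (el' + 1)
    · simp

theorem pyA_inner_snd_ge (draw_log : List Int) (stop_frame : Int) : ∀ f c el,
    el ≤ (pyA_inner draw_log stop_frame f c el).2 := by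
  intro f
  induction f with
  | zero => intro c el; simp [pyA_inner]
  | succ f ih =>
    intro c el
    rw [pyA_inner]
    split
    · have := ih (c + 1) (el + 1); omega
    · simp

-- with exact fuel, the inner loop steps / stops exactly like the Python while loop
theorem pyA_inner_step (draw_log : List Int) (stop_frame c el : Int)
    (hlt : c < stop_frame) (hv : (PySem.List.pyGet? draw_log c).getD 0 = 1) :
    pyA_inner draw_log stop_frame (stop_frame - c).toNat c el =
      pyA_inner draw_log stop_frame (stop_frame - (c + 1)).toNat (c + 1) (el + 1) := by
  have h : (stop_frame - c).toNat = (stop_frame - (c + 1)).toNat + 1 := by omega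
  rw [h, pyA_inner]
  simp [hlt, hv]

theorem pyA_inner_stop (draw_log : List Int) (stop_frame c el : Int)
    (h : ¬ (c < stop_frame ∧ (PySem.List.pyGet? draw_log c).getD 0 = 1)) :
    pyA_inner draw_log stop_frame (stop_frame - c).toNat c el = (c, el) := by
  cases hf : (stop_frame - c).toNat with
  | zero => rw [pyA_inner]
  | succ f => rw [pyA_inner]; simp [h]

-- any sufficient fuel computes the same as the exact fuel (the loop finishes on its own)
theorem pyA_outer_fuel (draw_log : List Int) (stop_frame : Int) : ∀ f c acc, (stop_frame + 1 - c).toNat ≤ f →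
    pyA_outer draw_log stop_frame f c acc =
      pyA_outer draw_log stop_frame (stop_frame + 1 - c).toNat c acc := by
  intro f
  induction f using Nat.strong_induction_on with
  | _ f ih =>
    intro c acc hle
    match f with
    | 0 =>
      have : (stop_frame + 1 - c).toNat = 0 := by omega
      rw [this]
    | Nat.succ f =>
      by_cases hc : c ≤ stop_frame
      · have hk : (stop_frame + 1 - c).toNat = (stop_frame - c).toNat + 1 := by omega
        rw [hk, pyA_outer, pyA_outer]
        simp only [hc, if_pos]
        have hge := pyA_inner_fst_ge draw_log stop_frame (stop_frame - c).toNat c 0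
        have h1 := ih f (by omega) ((pyA_inner draw_log stop_frame (stop_frame - c).toNat c 0).1 + 1)
          (if (pyA_inner draw_log stop_frame (stop_frame - c).toNat c 0).2 ≠ 0 then
            acc ++ [((pyA_inner draw_log stop_frame (stop_frame - c).toNat c 0).1 + 1 -
              (pyA_inner draw_log stop_frame (stop_frame - c).toNat c 0).2 - 1,
              (pyA_inner draw_log stop_frame (stop_frame - c).toNat c 0).1 + 1 - 1)] else acc)
          (by omega)
        have h2 := ih ((stop_frame - c).toNat) (by omega) ((pyA_inner draw_log stop_frame (stop_frame - c).toNat c 0).1 + 1)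
          (if (pyA_inner draw_log stop_frame (stop_frame - c).toNat c 0).2 ≠ 0 then
            acc ++ [((pyA_inner draw_log stop_frame (stop_frame - c).toNat c 0).1 + 1 -
              (pyA_inner draw_log stop_frame (stop_frame - c).toNat c 0).2 - 1,
              (pyA_inner draw_log stop_frame (stop_frame - c).toNat c 0).1 + 1 - 1)] else acc)
          (by omega)
        rw [h1, h2]
      · have : (stop_frame + 1 - c).toNat = 0 := by omega
        rw [this, pyA_outer, pyA_outer]
        simp [hc]

-- finalization step of B
def pyB_fin (stop_frame : Int) (st : List (Int × Int) × Bool × Int) : List (Int × Int) :=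
  if st.2.1 then st.1 ++ [(st.2.2, stop_frame)] else st.1

-- the coupled invariant: S (out of a run) and T (inside a run that started at rs; A is mid-inner-loop)
theorem AB_couple (draw_log : List Int) (stop_frame : Int) : ∀ n c, (stop_frame + 1 - c).toNat = n →
    (∀ eps rs, pyA_outer draw_log stop_frame (stop_frame + 1 - c).toNat c eps =
        pyB_fin stop_frame ((PySem.List.pyRange c stop_frame 1).foldl (pyB_step draw_log) (eps, false, rs)))
    ∧ (∀ eps rs, c ≤ stop_frame →
        pyB_fin stop_frame ((PySem.List.pyRange c stop_frame 1).foldl (pyB_step draw_log) (eps, true, rs)) =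
          pyA_outer draw_log stop_frame
            (stop_frame + 1 - ((pyA_inner draw_log stop_frame (stop_frame - c).toNat c 0).1 + 1)).toNat
            ((pyA_inner draw_log stop_frame (stop_frame - c).toNat c 0).1 + 1)
            (eps ++ [(rs, (pyA_inner draw_log stop_frame (stop_frame - c).toNat c 0).1)])) := by
  intro n
  induction n using Nat.strong_induction_on with
  | _ n ih =>
    intro c hn
    constructor
    · intro eps rs
      by_cases hc : c ≤ stop_frame
      · have hk : (stop_frame + 1 - c).toNat = (stop_frame - c).toNat + 1 := by omega
        rw [hk, pyA_outer]
        simp only [hc, if_pos]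
        by_cases hlt : c < stop_frame
        · rw [PySem.List.pyRange_one_cons hlt]
          simp only [List.foldl_cons]
          by_cases hv : (PySem.List.pyGet? draw_log c).getD 0 = 1
          · -- run starts at c
            have hinner := pyA_inner_step draw_log stop_frame c 0 hlt hv
            have hfst : (pyA_inner draw_log stop_frame (stop_frame - (c + 1)).toNat (c + 1) 1).1 =
                (pyA_inner draw_log stop_frame (stop_frame - (c + 1)).toNat (c + 1) 0).1 :=
              pyA_inner_fst_indep draw_log stop_frame _ (c + 1) 1 0
            have hge := pyA_inner_snd_ge draw_log stop_frame (stop_frame - (c + 1)).toNat (c + 1) 1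
            have hsub := pyA_inner_fst_sub draw_log stop_frame (stop_frame - (c + 1)).toNat (c + 1) 1
            have hT := (ih ((stop_frame + 1 - (c + 1)).toNat) (by omega) (c + 1) rfl).2 eps c
              (by omega)
            simp only [pyB_step, hv, if_pos, Bool.false_eq_true, ite_false]
            rw [hT]
            simp only [hinner, zero_add, hfst]
            have hge1 := pyA_inner_fst_ge draw_log stop_frame (stop_frame - (c + 1)).toNat (c + 1) 0
            have hne : (pyA_inner draw_log stop_frame (stop_frame - (c + 1)).toNat (c + 1) 1).2 ≠ 0 := by omega
            simp only [hne, ne_eq, not_false_eq_true, if_true]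
            rw [hfst] at hsub
            have hfuel := pyA_outer_fuel draw_log stop_frame (stop_frame - c).toNat
              ((pyA_inner draw_log stop_frame (stop_frame - (c + 1)).toNat (c + 1) 0).1 + 1)
              (eps ++ [((pyA_inner draw_log stop_frame (stop_frame - (c + 1)).toNat (c + 1) 0).1 + 1 -
                (pyA_inner draw_log stop_frame (stop_frame - (c + 1)).toNat (c + 1) 1).2 - 1,
                (pyA_inner draw_log stop_frame (stop_frame - (c + 1)).toNat (c + 1) 0).1 + 1 - 1)])
              (by omega)
            rw [hfuel]
            congr 3
            rw [Prod.mk.injEq]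
            constructor <;> omega
          · -- frame c inactive: A's inner loop stops immediately
            have hinner := pyA_inner_stop draw_log stop_frame c 0 (by tauto)
            have hS := (ih ((stop_frame + 1 - (c + 1)).toNat) (by omega) (c + 1) rfl).1 eps rs
            simp only [hinner, pyB_step, hv, ite_false, Bool.false_eq_true]
            have hfuel := pyA_outer_fuel draw_log stop_frame (stop_frame - c).toNat (c + 1) eps (by omega)
            simpa [hfuel] using hS
        · -- c = stop_frame: A does one empty iteration, B's range is empty
          have hinner := pyA_inner_stop draw_log stop_frame c 0 (by omega)
          have hempty : PySem.List.pyRange c stop_frame 1 = [] := by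
            rw [PySem.List.pyRange_one]
            simp [show (stop_frame - c).toNat = 0 by omega]
          have h0 : (stop_frame - c).toNat = 0 := by omega
          simp only [hinner, hempty, List.foldl_nil, pyB_fin, h0]
          rw [pyA_outer]
          simp [pyA_inner]
      · have hempty : PySem.List.pyRange c stop_frame 1 = [] := by
          rw [PySem.List.pyRange_one]
          simp [show (stop_frame - c).toNat = 0 by omega]
        have h0 : (stop_frame + 1 - c).toNat = 0 := by omega
        rw [h0, pyA_outer]
        simp [hempty, pyB_fin]
    · intro eps rs hc
      by_cases hlt : c < stop_frame
      · rw [PySem.List.pyRange_one_cons hlt]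
        simp only [List.foldl_cons]
        by_cases hv : (PySem.List.pyGet? draw_log c).getD 0 = 1
        · -- run continues
          have hinner := pyA_inner_step draw_log stop_frame c 0 hlt hv
          have hfst : (pyA_inner draw_log stop_frame (stop_frame - (c + 1)).toNat (c + 1) 1).1 =
              (pyA_inner draw_log stop_frame (stop_frame - (c + 1)).toNat (c + 1) 0).1 :=
            pyA_inner_fst_indep draw_log stop_frame _ (c + 1) 1 0
          have hT := (ih ((stop_frame + 1 - (c + 1)).toNat) (by omega) (c + 1) rfl).2 eps rs
            (by omega)
          simp only [pyB_step, hv, if_pos, if_true]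
          rw [hT, hinner]
          simp only [zero_add, hfst]
        · -- run ends at c: B appends (rs, c) and leaves the run
          have hinner := pyA_inner_stop draw_log stop_frame c 0 (by tauto)
          have hS := (ih ((stop_frame + 1 - (c + 1)).toNat) (by omega) (c + 1) rfl).1
            (eps ++ [(rs, c)]) rs
          simp only [pyB_step, hv, ite_false, if_true, hinner]
          simpa using hS.symm
      · -- c = stop_frame: range empty, B finalizes the open run; A appends and stops
        have hstop : c = stop_frame := by omega
        have hinner := pyA_inner_stop draw_log stop_frame c 0 (by omega)
        have hempty : PySem.List.pyRange c stop_frame 1 = [] := by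
          rw [PySem.List.pyRange_one]
          simp [show (stop_frame - c).toNat = 0 by omega]
        have h0 : (stop_frame + 1 - (c + 1)).toNat = 0 := by omega
        simp only [hempty, List.foldl_nil, pyB_fin, hinner, h0]
        rw [pyA_outer]
        simp [hstop]

-- ===== VERDICT (by name: the statement is the Claim_ definition above) =====
theorem get_draw_epochs_spec : Claim_equal_get_draw_epochs := by
  intro draw_log start_frame stop_frame _ _
  unfold Spec_get_draw_epochs get_draw_epochs get_draw_epochs_alt
  have h := (AB_couple draw_log stop_frame ((stop_frame + 1 - start_frame).toNat) start_frame rfl).1 [] 0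
  rw [h]
  rfl
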